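-- pv_equiv track=rewrite | github.com/matusmol/id_card_reader | src/idcardreader_package/idcardreader.py | splitToLineAndConvert
-- ===== SOURCE A (Python) =====
-- def splitToLineAndConvert(raw_data):
--     result = {}
--     line = ""
--     counter = 1
--
--     for char in raw_data:
--         if char == 13:
--             result[counter] = line
--             counter += 1
--             line = ""
--             continue
--         line += chr(char)
--
--     return result
-- ===== SOURCE B (Python) =====
-- def splitToLineAndConvert(raw_data):
--     def go(data, k):
--         if 13 not in data:
--             return {}
--         i = data.index(13)
--         out = {k: ''.join(map(chr, data[:i]))}
--         out.update(go(data[i + 1:], k + 1))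
--         return out
--     return go(list(raw_data), 1)
-- ===== Notes on version B (the rewrite author's own statement) =====
-- stated objective: alternative
-- what changed: Replaces A's single char-by-char scan with a string accumulator and inline dict writes by a recursive split: find the first CR with index(), emit that slice decoded in one go, and recurse on the remainder with the next line number.
-- outside the precondition, e.g. on splitToLineAndConvert([13, 55296]): A returns {1: ''}, B returns {1: ''}; on splitToLineAndConvert([1114112]): A raises ValueError, B returns {}
import Mathlib
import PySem

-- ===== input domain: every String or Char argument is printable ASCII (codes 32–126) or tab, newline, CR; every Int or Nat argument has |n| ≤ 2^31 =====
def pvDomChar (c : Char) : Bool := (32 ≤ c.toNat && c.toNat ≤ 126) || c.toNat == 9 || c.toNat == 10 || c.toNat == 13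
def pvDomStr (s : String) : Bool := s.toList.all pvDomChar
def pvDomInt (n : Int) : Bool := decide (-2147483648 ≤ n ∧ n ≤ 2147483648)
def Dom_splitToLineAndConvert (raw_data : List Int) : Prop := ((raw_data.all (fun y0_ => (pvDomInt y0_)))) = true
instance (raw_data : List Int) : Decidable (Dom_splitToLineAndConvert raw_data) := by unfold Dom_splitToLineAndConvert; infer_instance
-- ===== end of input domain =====

-- B replaces A's char-by-char scan with accumulator string by a recursive split at the
-- first CR (find index, slice, recurse); objective: alternative structure, same cost.

-- chr(c): exact on Pre_ (0 ≤ c ≤ 0x10FFFF, not a surrogate), where Char.ofNat is Python's chr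
def pvChr (c : Int) : Char := Char.ofNat c.toNat

-- ===== PORT A =====
-- one loop step of A: 'if char == 13: result[counter] = line; counter += 1; line = ""'
-- (counter keys are fresh and strictly increasing, so the dict insert is an append) else 'line += chr(char)'
def pvStepA (st : List (Int × String) × String × Int) (c : Int) : List (Int × String) × String × Int :=
  if c == 13 then (st.1 ++ [(st.2.2, st.2.1)], "", st.2.2 + 1)
  else (st.1, st.2.1.push (pvChr c), st.2.2)

def splitToLineAndConvert (raw_data : List Int) : List (Int × String) :=
  (raw_data.foldl pvStepA ([], "", 1)).1

-- ===== PORT B =====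
-- go(data, k): '13 not in data' → membership test; 'data.index(13)' → idxOf (exact: first
-- occurrence, 13 ∈ data); slices data[:i] / data[i+1:] with nonneg in-range indices → take/drop
-- (exact per PySem.List.slice_to_natCast / slice_from_natCast); 'out.update(go(...))' appends,
-- since the recursive call's keys k+1, k+2, … are disjoint from k → cons.
def pvGo (data : List Int) (k : Int) : List (Int × String) :=
  if h : (13 : Int) ∈ data then
    let i := data.idxOf 13
    (k, String.ofList ((data.take i).map pvChr)) :: pvGo (data.drop (i + 1)) (k + 1)
  else []
termination_by data.length
decreasing_by
  have hpos : 0 < data.length := List.length_pos_of_mem h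
  simp [List.length_drop]; omega

def splitToLineAndConvert_alt (raw_data : List Int) : List (Int × String) :=
  pvGo raw_data 1

-- ===== PRECONDITION & SPEC =====
-- Pre_ excludes elements on which chr raises ValueError (c < 0 or c > 0x10FFFF; A raises there)
-- and surrogate code points 0xD800–0xDFFF, on which A returns a lone-surrogate str that has no
-- valid Unicode scalar (not representable as a Lean Char, so neither port can be exact there).
def Pre_splitToLineAndConvert (raw_data : List Int) : Prop :=
  (raw_data.all (fun c => decide (0 ≤ c ∧ c ≤ 1114111 ∧ ¬(55296 ≤ c ∧ c ≤ 57343)))) = true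
instance (raw_data : List Int) : Decidable (Pre_splitToLineAndConvert raw_data) := by
  unfold Pre_splitToLineAndConvert; infer_instance

def pvWitness_splitToLineAndConvert : List Int := [72, 105, 13, 33]

def Spec_splitToLineAndConvert (raw_data : List Int) (out : List (Int × String)) : Prop :=
  out = splitToLineAndConvert_alt raw_data
instance (raw_data : List Int) (out : List (Int × String)) : Decidable (Spec_splitToLineAndConvert raw_data out) := by
  unfold Spec_splitToLineAndConvert; infer_instance

-- ===== CLAIM (what is proved, stated in full; the proofs are below) =====
def Claim_equal_splitToLineAndConvert : Prop := ∀ (raw_data : List Int), Dom_splitToLineAndConvert raw_data → Pre_splitToLineAndConvert raw_data → Spec_splitToLineAndConvert raw_data (splitToLineAndConvert raw_data)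

-- ===== LEMMAS AND PROOFS =====

-- common recursive specification: the numbered lines of l, given pending line p and next number k
def pvE : List Int → List Char → Int → List (Int × String)
  | [], _, _ => []
  | c :: t, p, k =>
      if c = 13 then (k, String.ofList p) :: pvE t [] (k + 1)
      else pvE t (p ++ [pvChr c]) k

theorem pvA_loop (l : List Int) : ∀ (res : List (Int × String)) (p : List Char) (k : Int),
    (l.foldl pvStepA (res, String.ofList p, k)).1 = res ++ pvE l p k := by
  induction l with
  | nil => intro res p k; simp [pvE]
  | cons c t ih =>
    intro res p k
    by_cases hc : c = 13
    · subst hc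
      have hstep : pvStepA (res, String.ofList p, k) 13
          = (res ++ [(k, String.ofList p)], String.ofList [], k + 1) := by
        simp [pvStepA]
      rw [List.foldl_cons, hstep, ih (res ++ [(k, String.ofList p)]) [] (k + 1)]
      simp [pvE]
    · have hpush : (String.ofList p).push (pvChr c) = String.ofList (p ++ [pvChr c]) := by
        rw [String.push_eq_append, String.ofList_append]
        congr 1
      have hstep : pvStepA (res, String.ofList p, k) c
          = (res, String.ofList (p ++ [pvChr c]), k) := by
        simp [pvStepA, hc, hpush]
      rw [List.foldl_cons, hstep, ih res (p ++ [pvChr c]) k]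
      simp [pvE, hc]

theorem pvE_no_cr (l : List Int) (h : (13 : Int) ∉ l) : ∀ p k, pvE l p k = [] := by
  induction l with
  | nil => intro p k; rfl
  | cons c t ih =>
    intro p k
    have hc : c ≠ 13 := by rintro rfl; exact h (List.mem_cons_self)
    have ht : (13 : Int) ∉ t := fun hm => h (List.mem_cons_of_mem _ hm)
    simp [pvE, hc, ih ht]

theorem pvE_split (pre rest : List Int) (h : (13 : Int) ∉ pre) : ∀ p k,
    pvE (pre ++ 13 :: rest) p k = (k, String.ofList (p ++ pre.map pvChr)) :: pvE rest [] (k + 1) := by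
  induction pre with
  | nil => intro p k; simp [pvE]
  | cons c t ih =>
    intro p k
    have hc : c ≠ 13 := by rintro rfl; exact h (List.mem_cons_self)
    have ht : (13 : Int) ∉ t := fun hm => h (List.mem_cons_of_mem _ hm)
    simp [pvE, hc, ih ht, List.append_assoc]

theorem pv_not_mem_take_idxOf (l : List Int) : (13 : Int) ∉ l.take (l.idxOf 13) := by
  intro hm
  rcases List.mem_take_iff_getElem.mp hm with ⟨j, hj, hje⟩
  have hjlt : j < l.idxOf 13 := by
    have := hj; simp at this; omega
  have h2 := List.not_of_lt_findIdx (xs := l) (p := (· == (13 : Int))) (h := hjlt)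
  exact absurd hje (by simpa using h2)

theorem pvGo_eq_pvE (n : Nat) : ∀ (data : List Int), data.length ≤ n → ∀ k, pvGo data k = pvE data [] k := by
  induction n with
  | zero =>
    intro data hlen k
    have : data = [] := List.eq_nil_of_length_eq_zero (Nat.le_zero.mp hlen)
    subst this; rw [pvGo]; simp [pvE]
  | succ m ih =>
    intro data hlen k
    by_cases h : (13 : Int) ∈ data
    · rw [pvGo]; simp only [h, dite_true]
      have hi : data.idxOf 13 < data.length := List.idxOf_lt_length_of_mem h
      have hdecomp : data = data.take (data.idxOf 13) ++ 13 :: data.drop (data.idxOf 13 + 1) := by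
        conv_lhs => rw [← List.take_append_drop (data.idxOf 13) data]
        rw [List.drop_eq_getElem_cons hi, List.getElem_idxOf]
      have hrec : pvGo (data.drop (data.idxOf 13 + 1)) (k + 1)
          = pvE (data.drop (data.idxOf 13 + 1)) [] (k + 1) := by
        apply ih
        have : (data.drop (data.idxOf 13 + 1)).length = data.length - (data.idxOf 13 + 1) := by simp
        omega
      rw [hrec]
      conv_rhs => rw [hdecomp]
      rw [pvE_split _ _ (pv_not_mem_take_idxOf data)]
      simp
    · rw [pvGo]; simp only [h, dite_false]
      exact (pvE_no_cr data h [] k).symm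

-- ===== VERDICT (by name: the statement is the Claim_ definition above) =====
theorem splitToLineAndConvert_spec : Claim_equal_splitToLineAndConvert := by
  intro raw_data _ _
  unfold Spec_splitToLineAndConvert splitToLineAndConvert splitToLineAndConvert_alt
  have h0 : ("" : String) = String.ofList [] := by simp
  rw [h0, pvA_loop raw_data [] [] 1, pvGo_eq_pvE raw_data.length raw_data le_rfl 1]
  simp
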